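-- pv_equiv track=rewrite | github.com/jazcap53/Find-Tunes | get_1024_sr_pairs.py | find_songs_in_db
-- ===== SOURCE A (Python) =====
-- def find_songs_in_db(all_items: list[tuple], song_and_file_names: list[tuple]):
--     """
--     Return a set containing a (song name, file name) tuple for each
--     song from the file system that is found in the database.
--
--     parameter: all_items --
--                DB_BATCH_SIZE (song id, song title,
--                               release id, release string) tuples
--     parameter: song_and_file_names --
--                a (song name, file name) tuple for each song found in
--                the directory being examined
--     """
--     song_names_only = [safn[0] for safn in song_and_file_names]
--     songs_found_in_db = set()
--     for item in all_items:
--         if item[1] in song_names_only: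
--             for song_and_file in song_and_file_names:
--                 if song_and_file[0] == item[1]:
--                     songs_found_in_db.add(song_and_file)
--     return songs_found_in_db
-- ===== SOURCE B (Python) =====
-- def find_songs_in_db(all_items, song_and_file_names):
--     # Index the file-system songs by title once, then one pass over all_items:
--     # O(N+M) instead of A's O(N*M) nested scans.
--     by_title = {}
--     for saf in song_and_file_names:
--         by_title.setdefault(saf[0], []).append(saf)
--     songs_found_in_db = set()
--     for item in all_items:
--         for saf in by_title.get(item[1], []):
--             songs_found_in_db.add(saf)
--     return songs_found_in_db
-- ===== Notes on version B (the rewrite author's own statement) =====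
-- stated objective: faster
-- what changed: B builds a title->pairs index over song_and_file_names once and looks each DB title up in it, eliminating A's per-item membership test and inner rescan of song_and_file_names.
import Mathlib
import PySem

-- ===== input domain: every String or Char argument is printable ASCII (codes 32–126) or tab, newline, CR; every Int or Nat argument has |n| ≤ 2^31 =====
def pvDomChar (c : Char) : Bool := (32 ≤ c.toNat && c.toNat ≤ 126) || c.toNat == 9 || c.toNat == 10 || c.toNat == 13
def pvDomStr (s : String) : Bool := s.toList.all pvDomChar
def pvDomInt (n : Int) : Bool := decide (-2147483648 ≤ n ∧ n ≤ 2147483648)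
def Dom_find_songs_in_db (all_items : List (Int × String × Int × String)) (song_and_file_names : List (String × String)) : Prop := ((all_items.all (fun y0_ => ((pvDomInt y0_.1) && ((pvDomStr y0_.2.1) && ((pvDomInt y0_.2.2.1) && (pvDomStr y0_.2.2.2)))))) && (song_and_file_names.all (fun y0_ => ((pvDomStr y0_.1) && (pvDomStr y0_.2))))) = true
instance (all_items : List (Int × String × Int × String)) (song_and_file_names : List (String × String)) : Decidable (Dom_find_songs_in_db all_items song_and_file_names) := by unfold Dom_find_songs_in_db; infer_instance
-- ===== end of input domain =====

-- ===== PORT A =====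
-- B builds the title index once; A rescans song_and_file_names per DB item.
def find_songs_in_db (all_items : List (Int × String × Int × String)) (song_and_file_names : List (String × String)) : List (String × String) :=
  let song_names_only := song_and_file_names.map (fun safn => safn.1)
  all_items.foldl (fun songs item =>
    if song_names_only.contains item.2.1 then
      song_and_file_names.foldl (fun songs saf =>
        if saf.1 == item.2.1 then PySem.Set.add songs saf else songs) songs
    else songs) PySem.Set.empty

-- ===== PORT B =====
def find_songs_in_db_alt (all_items : List (Int × String × Int × String)) (song_and_file_names : List (String × String)) : List (String × String) :=
  let by_title := song_and_file_names.foldl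
    (fun d saf => d.modify saf.1 [] (fun xs => xs ++ [saf])) PySem.Dict.empty
  all_items.foldl (fun songs item =>
    (by_title.getD item.2.1 []).foldl PySem.Set.add songs) PySem.Set.empty

-- ===== PRECONDITION & SPEC =====
def Spec_find_songs_in_db (all_items : List (Int × String × Int × String)) (song_and_file_names : List (String × String)) (out : List (String × String)) : Prop := out = find_songs_in_db_alt all_items song_and_file_names
instance (all_items : List (Int × String × Int × String)) (song_and_file_names : List (String × String)) (out : List (String × String)) : Decidable (Spec_find_songs_in_db all_items song_and_file_names out) := by unfold Spec_find_songs_in_db; infer_instance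

-- ===== CLAIM (what is proved, stated in full; the proofs are below) =====
def Claim_equal_find_songs_in_db : Prop := ∀ (all_items : List (Int × String × Int × String)) (song_and_file_names : List (String × String)), Dom_find_songs_in_db all_items song_and_file_names → Spec_find_songs_in_db all_items song_and_file_names (find_songs_in_db all_items song_and_file_names)

-- ===== LEMMAS AND PROOFS =====

-- ===== VERDICT (by name: the statement is the Claim_ definition above) =====
-- The index built by B holds, under each title t, exactly the pairs of song_and_file_names whose title is t, in order.
lemma getD_build (l : List (String × String)) (d : PySem.Dict String (List (String × String))) (t : String) :
    (l.foldl (fun d saf => d.modify saf.1 [] (fun xs => xs ++ [saf])) d).getD t [] =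
      d.getD t [] ++ l.filter (fun saf => saf.1 == t) := by
  induction l generalizing d with
  | nil => simp
  | cons saf rest ih =>
    simp only [List.foldl_cons, List.filter_cons, ih, PySem.Dict.getD_modify]
    by_cases h : saf.1 = t
    · simp [h]
    · simp [h, Ne.symm h]

-- A's guarded inner rescan and B's indexed inner fold perform the same additions.
lemma foldl_filter_add (l : List (String × String)) (t : String) (s : PySem.Set (String × String)) :
    (l.filter (fun saf => saf.1 == t)).foldl PySem.Set.add s
      = l.foldl (fun s saf => if saf.1 == t then PySem.Set.add s saf else s) s := by
  induction l generalizing s with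
  | nil => rfl
  | cons a rest ih =>
    by_cases h : a.1 = t
    · simp [h, ih]
    · simp [h, ih]

lemma foldl_no_match (l : List (String × String)) (t : String) (s : PySem.Set (String × String))
    (hnone : ∀ saf ∈ l, (saf.1 == t) = false) :
    l.foldl (fun s saf => if saf.1 == t then PySem.Set.add s saf else s) s = s := by
  induction l generalizing s with
  | nil => rfl
  | cons a rest ih =>
    simp only [List.foldl_cons, hnone a (by simp), Bool.false_eq_true, if_false]
    exact ih s (fun x hm => hnone x (by simp [hm]))

lemma step_eq (sfn : List (String × String)) (t : String) (s : PySem.Set (String × String)) :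
    (if (sfn.map (fun safn => safn.1)).contains t then
       sfn.foldl (fun s saf => if saf.1 == t then PySem.Set.add s saf else s) s
     else s)
    = (sfn.filter (fun saf => saf.1 == t)).foldl PySem.Set.add s := by
  rw [foldl_filter_add]
  by_cases h : (sfn.map (fun safn => safn.1)).contains t = true
  · rw [if_pos h]
  · rw [if_neg h]
    have hmem : t ∉ sfn.map (fun safn => safn.1) := by simpa using h
    refine (foldl_no_match sfn t s ?_).symm
    intro saf hm
    simp only [beq_eq_false_iff_ne]
    intro he
    exact hmem (List.mem_map.mpr ⟨saf, hm, he⟩)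

-- The two outer folds over all_items agree step by step.
lemma main_fold (items : List (Int × String × Int × String)) (sfn : List (String × String))
    (s : PySem.Set (String × String)) :
    items.foldl (fun songs item =>
      if (sfn.map (fun safn => safn.1)).contains item.2.1 then
        sfn.foldl (fun songs saf =>
          if saf.1 == item.2.1 then PySem.Set.add songs saf else songs) songs
      else songs) s
    = items.foldl (fun songs item =>
        ((sfn.foldl (fun d saf => d.modify saf.1 [] (fun xs => xs ++ [saf]))
            PySem.Dict.empty).getD item.2.1 []).foldl PySem.Set.add songs) s := by
  simp only [getD_build, PySem.Dict.getD_empty, List.nil_append, step_eq]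

theorem find_songs_in_db_spec : Claim_equal_find_songs_in_db := by
  intro all_items sfn _
  unfold Spec_find_songs_in_db find_songs_in_db find_songs_in_db_alt
  exact main_fold all_items sfn PySem.Set.empty
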